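-- pv_equiv track=rewrite | github.com/pjot/advent-of-code | 2015/16/16.py | part_two
-- ===== SOURCE A (Python) =====
-- REAL = {
--     "children": 3,
--     "cats": 7,
--     "samoyeds": 2,
--     "pomeranians": 3,
--     "akitas": 0,
--     "vizslas": 0,
--     "goldfish": 5,
--     "trees": 3,
--     "cars": 2,
--     "perfumes": 1,
-- }
--
-- def part_two(aunt):
--     greater_than = ["cats", "trees"]
--     less_than = ["pomeranians", "goldfish"]
--
--     for k, v in REAL.items():
--         av = aunt.get(k)
--         if av is None:
--             continue
--
--         if k in greater_than:
--             if not av > v: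
--                 return False
--         elif k in less_than:
--             if not av < v:
--                 return False
--         else:
--             if av != v:
--                 return False
--     return True
-- ===== SOURCE B (Python) =====
-- # B: instead of walking the REAL table and branching three ways per key, walk the
-- # AUNT's own items and check each against a precomputed inclusive interval
-- # [lo, hi] (None = unbounded): 'cats' > 7 becomes lo = 8, 'pomeranians' < 3
-- # becomes hi = 2, equality keys get lo = hi = value. Keys unknown to BOUNDS are
-- # skipped, so extra aunt keys behave as in A; REAL keys absent from aunt are
-- # never visited, matching A's None-skip.
-- BOUNDS = {
--     "children": (3, 3),
--     "cats": (8, None),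
--     "samoyeds": (2, 2),
--     "pomeranians": (None, 2),
--     "akitas": (0, 0),
--     "vizslas": (0, 0),
--     "goldfish": (None, 4),
--     "trees": (4, None),
--     "cars": (2, 2),
--     "perfumes": (1, 1),
-- }
--
-- def part_two(aunt):
--     for k, v in aunt.items():
--         bounds = BOUNDS.get(k)
--         if bounds is None:
--             continue
--         lo, hi = bounds
--         if (lo is not None and v < lo) or (hi is not None and v > hi):
--             return False
--     return True
-- ===== Notes on version B (the rewrite author's own statement) =====
-- stated objective: alternative
-- what changed: B reverses the traversal and the data structure: instead of A's pass over the REAL table with a three-way if/elif/else per key and two membership lists, B walks the aunt's own items and checks each value against a precomputed inclusive interval table (lo, hi) with None for an open end, skipping keys without an interval. Pre_ excludes association lists with duplicate keys: they do not arise from a Python dict, and on them A's port (first-match lookup) and B's port (visits every binding) read the ambiguous encoding in two equally defensible ways.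
import Mathlib
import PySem

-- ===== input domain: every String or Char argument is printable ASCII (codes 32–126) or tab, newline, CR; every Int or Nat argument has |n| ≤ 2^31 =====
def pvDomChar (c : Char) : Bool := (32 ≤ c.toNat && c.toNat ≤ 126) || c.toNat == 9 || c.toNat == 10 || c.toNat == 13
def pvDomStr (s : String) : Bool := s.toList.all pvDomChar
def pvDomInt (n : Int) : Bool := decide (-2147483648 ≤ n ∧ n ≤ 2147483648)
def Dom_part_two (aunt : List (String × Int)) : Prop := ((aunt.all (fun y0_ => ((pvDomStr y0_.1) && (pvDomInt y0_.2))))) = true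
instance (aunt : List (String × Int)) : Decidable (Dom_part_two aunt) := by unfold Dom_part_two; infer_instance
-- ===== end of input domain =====

-- B walks the aunt's items against a precomputed interval table instead of A's pass over
-- REAL with a three-way branch ladder; same return value on every duplicate-free input.

-- ===== PORT A =====
def pvREAL : List (String × Int) :=
  [("children", 3), ("cats", 7), ("samoyeds", 2), ("pomeranians", 3), ("akitas", 0),
   ("vizslas", 0), ("goldfish", 5), ("trees", 3), ("cars", 2), ("perfumes", 1)]

-- the for-loop over REAL.items() with early 'return False'
def pvALoop (aunt : List (String × Int)) : List (String × Int) → Bool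
  | [] => true
  | (k, v) :: rest =>
    match PySem.Dict.get? (PySem.Dict.mk aunt) k with
    | none => pvALoop aunt rest
    | some av =>
      if (["cats", "trees"] : List String).contains k then
        if !(decide (av > v)) then false else pvALoop aunt rest
      else if (["pomeranians", "goldfish"] : List String).contains k then
        if !(decide (av < v)) then false else pvALoop aunt rest
      else
        if av != v then false else pvALoop aunt rest

def part_two (aunt : List (String × Int)) : Bool := pvALoop aunt pvREAL

-- ===== PORT B =====
-- BOUNDS: key ↦ (lo, hi), None = unbounded on that side
def pvBOUNDS : List (String × (Option Int × Option Int)) :=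
  [("children", (some 3, some 3)), ("cats", (some 8, none)), ("samoyeds", (some 2, some 2)),
   ("pomeranians", (none, some 2)), ("akitas", (some 0, some 0)), ("vizslas", (some 0, some 0)),
   ("goldfish", (none, some 4)), ("trees", (some 4, none)), ("cars", (some 2, some 2)),
   ("perfumes", (some 1, some 1))]

-- (lo is not None and v < lo) or (hi is not None and v > hi)
def pvOutOfBounds (v : Int) (lo hi : Option Int) : Bool :=
  (match lo with | none => false | some l => decide (v < l)) ||
  (match hi with | none => false | some h => decide (v > h))

-- the for-loop over aunt.items() with early 'return False'
def pvBLoop : List (String × Int) → Bool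
  | [] => true
  | (k, v) :: rest =>
    match PySem.Dict.get? (PySem.Dict.mk pvBOUNDS) k with
    | none => pvBLoop rest
    | some (lo, hi) => if pvOutOfBounds v lo hi then false else pvBLoop rest

def part_two_alt (aunt : List (String × Int)) : Bool := pvBLoop aunt

-- ===== PRECONDITION & SPEC =====
-- Pre_ excludes association lists with duplicate keys: they do not arise from a Python dict,
-- and on them A's port (first-match lookup) and B's port (visits every binding) read the
-- ambiguous encoding in two equally defensible ways.
def Pre_part_two (aunt : List (String × Int)) : Prop := (aunt.map Prod.fst).Nodup
instance (aunt : List (String × Int)) : Decidable (Pre_part_two aunt) := by unfold Pre_part_two; infer_instance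
def pvWitness_part_two : (List (String × Int)) := [("cats", 9), ("trees", 2)]

def Spec_part_two (aunt : List (String × Int)) (out : Bool) : Prop := out = part_two_alt aunt
instance (aunt : List (String × Int)) (out : Bool) : Decidable (Spec_part_two aunt out) := by unfold Spec_part_two; infer_instance

-- ===== CLAIM (what is proved, stated in full; the proofs are below) =====
def Claim_equal_part_two : Prop := ∀ (aunt : List (String × Int)), Dom_part_two aunt → Pre_part_two aunt → Spec_part_two aunt (part_two aunt)

-- ===== LEMMAS AND PROOFS =====

-- the comparison A applies at key k (REAL value v, aunt value av)
def pvAPred (k : String) (av v : Int) : Bool :=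
  if (["cats", "trees"] : List String).contains k then decide (av > v)
  else if (["pomeranians", "goldfish"] : List String).contains k then decide (av < v)
  else av == v

def pvACheck (aunt : List (String × Int)) (k : String) (v : Int) : Bool :=
  match PySem.Dict.get? (PySem.Dict.mk aunt) k with
  | none => true
  | some av => pvAPred k av v

def pvBCheck (k : String) (v : Int) : Bool :=
  match PySem.Dict.get? (PySem.Dict.mk pvBOUNDS) k with
  | none => true
  | some (lo, hi) => !pvOutOfBounds v lo hi

theorem pvALoop_eq_all (aunt : List (String × Int)) :
    ∀ rs : List (String × Int), pvALoop aunt rs = rs.all (fun p => pvACheck aunt p.1 p.2) := by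
  intro rs
  induction rs with
  | nil => rfl
  | cons p rest ih =>
    obtain ⟨k, v⟩ := p
    rw [List.all_cons, ← ih]
    clear ih
    simp only [pvALoop, pvACheck, pvAPred]
    cases h : PySem.Dict.get? (PySem.Dict.mk aunt) k with
    | none => simp
    | some av => split_ifs <;> rw [Bool.eq_iff_iff] <;> simp_all

theorem pvBLoop_eq_all :
    ∀ l : List (String × Int), pvBLoop l = l.all (fun p => pvBCheck p.1 p.2) := by
  intro l
  induction l with
  | nil => rfl
  | cons p rest ih =>
    obtain ⟨k, v⟩ := p
    rw [List.all_cons, ← ih]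
    clear ih
    simp only [pvBLoop, pvBCheck]
    cases h : PySem.Dict.get? (PySem.Dict.mk pvBOUNDS) k with
    | none => simp
    | some b =>
      obtain ⟨lo, hi⟩ := b
      cases hc : pvOutOfBounds v lo hi <;> simp [hc]

-- at each REAL key, B's interval check agrees with A's comparison against REAL's value
theorem pvCheck_bridge : ∀ p ∈ pvREAL, ∀ av : Int, pvBCheck p.1 av = pvAPred p.1 av p.2 := by
  intro p hp av
  fin_cases hp <;>
    (simp only [pvBCheck, pvBOUNDS, pvAPred, PySem.Dict.get?_mk_cons, pvOutOfBounds];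
     rw [Bool.eq_iff_iff]; simp; omega)

-- keys absent from REAL have no interval in BOUNDS
theorem pvBCheck_missing (k : String) (hk : k ∉ pvREAL.map Prod.fst) (v : Int) :
    pvBCheck k v = true := by
  simp only [pvREAL, List.map, List.mem_cons, not_or] at hk
  obtain ⟨h1, h2, h3, h4, h5, h6, h7, h8, h9, h10, -⟩ := hk
  simp [pvBCheck, pvBOUNDS, PySem.Dict.get?, Ne.symm h1, Ne.symm h2,
    Ne.symm h3, Ne.symm h4, Ne.symm h5, Ne.symm h6, Ne.symm h7, Ne.symm h8, Ne.symm h9,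
    Ne.symm h10]

theorem pvMain (aunt : List (String × Int)) (hnd : (aunt.map Prod.fst).Nodup) :
    pvREAL.all (fun p => pvACheck aunt p.1 p.2) = aunt.all (fun p => pvBCheck p.1 p.2) := by
  have hnd' : (PySem.Dict.mk aunt).keys.Nodup := by
    simpa [PySem.Dict.keys] using hnd
  rw [Bool.eq_iff_iff]
  simp only [List.all_eq_true]
  constructor
  · intro hA p hp
    obtain ⟨k, v⟩ := p
    by_cases hk : k ∈ pvREAL.map Prod.fst
    · obtain ⟨q, hq, hqk⟩ := List.mem_map.mp hk
      obtain ⟨k', v₀⟩ := q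
      cases hqk
      have hget : PySem.Dict.get? (PySem.Dict.mk aunt) k' = some v :=
        (PySem.Dict.get?_eq_some_iff_mem_items _ _ _ hnd').mpr hp
      have hA' := hA _ hq
      simp only [pvACheck, hget] at hA'
      rw [pvCheck_bridge _ hq v]
      exact hA'
    · exact pvBCheck_missing k hk v
  · intro hB p hp
    obtain ⟨k, v₀⟩ := p
    simp only [pvACheck]
    cases hg : PySem.Dict.get? (PySem.Dict.mk aunt) k with
    | none => rfl
    | some av =>
      have hmem : (k, av) ∈ aunt := PySem.Dict.mem_items_of_get?_eq_some _ hg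
      have hB' := hB _ hmem
      rw [pvCheck_bridge _ hp av] at hB'
      exact hB'

-- ===== VERDICT (by name: the statement is the Claim_ definition above) =====
theorem part_two_spec : Claim_equal_part_two := by
  intro aunt _ hpre
  unfold Spec_part_two part_two part_two_alt
  rw [pvALoop_eq_all, pvBLoop_eq_all, pvMain aunt hpre]
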